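-- pv_equiv track=rewrite | github.com/chubby-panda/shecodes-python-work | parity_card_trick/parity.py | add_row
-- ===== SOURCE A (Python) =====
-- def add_row(grid):
--     """Adds a new row to a grid. For each column, if there is an even
--     number of X characters, a O is added to the column, otherwise a X is added
--     to the column.
--
--     Arguments:
--         grid: A list of lists, where each sublist represents a row in a grid.
--
--     Returns:
--         The same grid, with a new row added.
--     """
--     last_row = []
--     columns = list(zip(*grid))
--     for column in columns:
--         x_counter = 0
--         for item in column:
--             if item == "X":
--                 x_counter += 1
--         if x_counter%2 != 0:
--             last_row.append("X")
--         elif x_counter%2 == 0: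
--             last_row.append("O")
--     grid.append(last_row)
--     return grid
-- ===== SOURCE B (Python) =====
-- def add_row(grid):
--     n = min((len(row) for row in grid), default=0)
--     flags = [False] * n
--     for row in grid:
--         flags = [f ^ (c == "X") for f, c in zip(flags, row)]
--     grid.append(["X" if f else "O" for f in flags])
--     return grid
-- ===== Notes on version B (the rewrite author's own statement) =====
-- stated objective: alternative
-- what changed: Replaces the zip(*grid) transpose plus per-column counting loop by a single row-major pass that folds each row into a per-column Boolean parity accumulator (initialised to the minimum row length), so the grid is traversed once in row order and no transposed copy or integer counters are built.
import Mathlib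
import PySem

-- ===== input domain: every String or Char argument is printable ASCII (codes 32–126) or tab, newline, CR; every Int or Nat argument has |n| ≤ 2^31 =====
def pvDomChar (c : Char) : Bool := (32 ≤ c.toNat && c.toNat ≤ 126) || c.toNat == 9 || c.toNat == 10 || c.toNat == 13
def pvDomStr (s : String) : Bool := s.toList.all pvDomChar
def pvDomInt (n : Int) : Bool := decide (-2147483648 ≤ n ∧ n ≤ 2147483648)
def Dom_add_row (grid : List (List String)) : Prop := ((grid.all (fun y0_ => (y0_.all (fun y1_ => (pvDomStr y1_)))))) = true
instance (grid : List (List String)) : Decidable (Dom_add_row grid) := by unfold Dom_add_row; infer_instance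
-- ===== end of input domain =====

-- B replaces A's zip(*grid) transpose + per-column X counting by one row-major pass over a
-- per-column Boolean parity accumulator (alternative decomposition, same cost).
-- Python A mutates `grid` in place (grid.append); B performs the same mutation, and the
-- equivalence proved here is about the returned value.

-- ===== PORT A =====
-- zip(*grid): fuel-based transcription of Python's zip truncation; the fuel (first row's
-- length + 1) strictly bounds the recursion depth, so this is exact on every input.
def zipStarGo : Nat → List (List String) → List (List String)
  | 0, _ => []
  | Nat.succ k, rows =>
      if rows.any (fun x => x.isEmpty) then []
      else (rows.map (fun x => x.headD "")) :: zipStarGo k (rows.map (fun x => x.tail))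

def zipStar (rows : List (List String)) : List (List String) :=
  match rows with
  | [] => []
  | r :: _ => zipStarGo (r.length + 1) rows

def add_row (grid : List (List String)) : List (List String) :=
  let last_row :=
    (zipStar grid).foldl
      (fun acc column =>
        let x_counter :=
          column.foldl (fun x item => if item == "X" then x + 1 else x) (0 : Int)
        if PySem.Int.mod x_counter 2 ≠ 0 then acc ++ ["X"]
        else if PySem.Int.mod x_counter 2 = 0 then acc ++ ["O"] else acc)
      []
  grid ++ [last_row]

-- ===== PORT B =====
-- min((len(row) for row in grid), default=0)
def minLen (grid : List (List String)) : Nat :=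
  match grid with
  | [] => 0
  | r :: rs => rs.foldl (fun m row => min m row.length) r.length

def add_row_alt (grid : List (List String)) : List (List String) :=
  let n := minLen grid
  let flags :=
    grid.foldl (fun fl row => List.zipWith (fun f c => f ^^ (c == "X")) fl row)
      (List.replicate n false)
  grid ++ [flags.map (fun f => if f then "X" else "O")]

-- ===== PRECONDITION & SPEC =====
def Spec_add_row (grid : List (List String)) (out : List (List String)) : Prop := out = add_row_alt grid
instance (grid : List (List String)) (out : List (List String)) : Decidable (Spec_add_row grid out) := by unfold Spec_add_row; infer_instance

-- ===== CLAIM (what is proved, stated in full; the proofs are below) =====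
def Claim_equal_add_row : Prop := ∀ (grid : List (List String)), Dom_add_row grid → Spec_add_row grid (add_row grid)

-- ===== LEMMAS AND PROOFS =====

-- column j of the grid, with getD (always in range where we use it)
def pvCol (grid : List (List String)) (j : Nat) : List String :=
  grid.map (fun r => r.getD j "")

lemma mf_init_le : ∀ (rs : List (List String)) (a : Nat),
    rs.foldl (fun m row => min m row.length) a ≤ a := by
  intro rs
  induction rs with
  | nil => simp
  | cons r rs ih =>
    intro a
    exact le_trans (ih (min a r.length)) (min_le_left _ _)

lemma mf_le_mem : ∀ (rs : List (List String)) (a : Nat) (r : List String), r ∈ rs →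
    rs.foldl (fun m row => min m row.length) a ≤ r.length := by
  intro rs
  induction rs with
  | nil => intro a r h; cases h
  | cons q qs ih =>
    intro a r h
    rcases List.mem_cons.mp h with h | h
    · subst h
      exact le_trans (mf_init_le qs (min a r.length)) (min_le_right _ _)
    · exact ih (min a q.length) r h

lemma minLen_le {grid : List (List String)} {r : List String} (h : r ∈ grid) :
    minLen grid ≤ r.length := by
  match grid with
  | q :: qs =>
    rcases List.mem_cons.mp h with h' | h'
    · subst h'; exact mf_init_le qs r.length
    · exact mf_le_mem qs q.length r h'

lemma mf_exists_zero : ∀ (rs : List (List String)) (a : Nat),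
    rs.foldl (fun m row => min m row.length) a = 0 →
    a = 0 ∨ ∃ r ∈ rs, r.length = 0 := by
  intro rs
  induction rs with
  | nil => intro a h; left; simpa using h
  | cons r rs ih =>
    intro a h
    rcases ih _ h with h' | ⟨q, hq, hq0⟩
    · rcases Nat.min_eq_zero_iff.mp h' with h'' | h''
      · exact Or.inl h''
      · exact Or.inr ⟨r, List.mem_cons_self, h''⟩
    · exact Or.inr ⟨q, List.mem_cons_of_mem _ hq, hq0⟩

lemma mf_map_tail : ∀ (rs : List (List String)) (a : Nat),
    (∀ r ∈ rs, 1 ≤ r.length) → 1 ≤ a →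
    (rs.map (fun x => x.tail)).foldl (fun m row => min m row.length) (a - 1)
      = rs.foldl (fun m row => min m row.length) a - 1 := by
  intro rs
  induction rs with
  | nil => simp
  | cons r rs ih =>
    intro a hall ha
    have hr : 1 ≤ r.length := hall r List.mem_cons_self
    simp only [List.map_cons, List.foldl_cons, List.length_tail]
    have h1 : min (a - 1) (r.length - 1) = min a r.length - 1 := by omega
    rw [h1, ih (min a r.length) (fun q hq => hall q (List.mem_cons_of_mem _ hq)) (by omega)]

lemma headD_eq_getD (r : List String) : r.headD "" = r.getD 0 "" := by
  cases r <;> simp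

lemma zipStarGo_eq : ∀ (n : Nat) (rows : List (List String)) (fuel : Nat),
    rows ≠ [] → minLen rows = n → n < fuel →
    zipStarGo fuel rows = (List.range n).map (fun j => pvCol rows j) := by
  intro n
  induction n with
  | zero =>
    intro rows fuel hne hmin hf
    match fuel, rows with
    | Nat.succ k, r :: rs =>
      have : ∃ q ∈ r :: rs, q.length = 0 := by
        rcases mf_exists_zero rs r.length (by simpa [minLen] using hmin) with h | ⟨q, hq, h0⟩
        · exact ⟨r, List.mem_cons_self, h⟩
        · exact ⟨q, List.mem_cons_of_mem _ hq, h0⟩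
      rcases this with ⟨q, hq, h0⟩
      have hany : (r :: rs).any (fun x => x.isEmpty) = true :=
        List.any_eq_true.mpr ⟨q, hq, by simp [List.length_eq_zero_iff.mp h0]⟩
      simp [zipStarGo, hany]
  | succ n ih =>
    intro rows fuel hne hmin hf
    match fuel, rows with
    | Nat.succ k, r :: rs =>
      have hall : ∀ q ∈ r :: rs, 1 ≤ q.length := by
        intro q hq
        have h1 := minLen_le hq
        rw [hmin] at h1
        omega
      have hany : (r :: rs).any (fun x => x.isEmpty) = false := by
        rw [List.any_eq_false]
        intro q hq
        have h1 := hall q hq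
        cases q with
        | nil => simp at h1
        | cons a t => simp
      have htail : minLen ((r :: rs).map (fun x => x.tail)) = n := by
        simp only [minLen, List.map_cons, List.length_tail]
        rw [mf_map_tail rs r.length (fun q hq => hall q (List.mem_cons_of_mem _ hq))
              (hall r List.mem_cons_self)]
        have h2 : rs.foldl (fun m row => min m row.length) r.length = n + 1 := by
          simpa [minLen] using hmin
        omega
      have hrec := ih ((r :: rs).map (fun x => x.tail)) k (by simp) htail (by omega)
      simp only [zipStarGo, hany, Bool.false_eq_true, if_false, hrec]
      rw [List.range_succ_eq_map]
      simp only [List.map_cons, List.map_map]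
      congr 1
      · simp only [pvCol, List.map_cons]
        rw [headD_eq_getD]
        congr 1
        exact List.map_congr_left (fun q _ => headD_eq_getD q)
      · apply List.map_congr_left
        intro j _
        simp [pvCol, Function.comp, List.map_map]

lemma zipStar_eq (rows : List (List String)) (hne : rows ≠ []) :
    zipStar rows = (List.range (minLen rows)).map (fun j => pvCol rows j) := by
  match rows with
  | r :: rs =>
    have h1 : minLen (r :: rs) ≤ r.length := minLen_le List.mem_cons_self
    exact zipStarGo_eq (minLen (r :: rs)) (r :: rs) (r.length + 1) hne rfl (by omega)

lemma getD_range_map (n j : Nat) (g : Nat → Bool) (hj : j < n) :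
    ((List.range n).map g).getD j false = g j := by
  have h2 : j < ((List.range n).map g).length := by simpa using hj
  rw [List.getD_eq_getElem _ _ h2]
  simp

lemma self_eq_range_getD (fl : List Bool) :
    (List.range fl.length).map (fun j => fl.getD j false) = fl := by
  apply List.ext_getElem
  · simp
  · intro i h1 h2
    simp only [List.getElem_map, List.getElem_range]
    exact List.getD_eq_getElem _ _ h2

lemma zipWith_eq_range : ∀ (fl : List Bool) (row : List String), fl.length ≤ row.length →
    List.zipWith (fun f c => f ^^ (c == "X")) fl row
      = (List.range fl.length).map (fun j => fl.getD j false ^^ (row.getD j "" == "X")) := by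
  intro fl
  induction fl with
  | nil => intro row _; simp
  | cons f fl ih =>
    intro row hlen
    match row with
    | c :: row =>
      simp only [List.zipWith_cons_cons, List.length_cons, List.range_succ_eq_map,
        List.map_cons, List.map_map]
      congr 1
      rw [ih row (by simpa using hlen)]
      apply List.map_congr_left
      intro j _
      simp

lemma fold_rows_eq : ∀ (rows : List (List String)) (fl : List Bool),
    (∀ r ∈ rows, fl.length ≤ r.length) →
    rows.foldl (fun f row => List.zipWith (fun b c => b ^^ (c == "X")) f row) fl
      = (List.range fl.length).map
          (fun j => rows.foldl (fun b r => b ^^ (r.getD j "" == "X")) (fl.getD j false)) := by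
  intro rows
  induction rows with
  | nil =>
    intro fl _
    simp only [List.foldl_nil]
    exact (self_eq_range_getD fl).symm
  | cons row rows ih =>
    intro fl hall
    have hlen : fl.length ≤ row.length := hall row List.mem_cons_self
    simp only [List.foldl_cons]
    have hlen' : (List.zipWith (fun b c => b ^^ (c == "X")) fl row).length = fl.length := by
      simp; omega
    rw [ih _ (by rw [hlen']; exact fun r hr => hall r (List.mem_cons_of_mem _ hr)), hlen']
    apply List.map_congr_left
    intro j hj
    rw [zipWith_eq_range fl row hlen,
      getD_range_map fl.length j _ (List.mem_range.mp hj)]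

lemma parity_fold : ∀ (l : List String) (c : Int) (b : Bool),
    (PySem.Int.mod c 2 ≠ 0 ↔ b = true) →
    (PySem.Int.mod (l.foldl (fun x item => if item == "X" then x + 1 else x) c) 2 ≠ 0
      ↔ (l.foldl (fun bb item => bb ^^ (item == "X")) b) = true) := by
  intro l
  induction l with
  | nil => intro c b h; simpa using h
  | cons a l ih =>
    intro c b h
    simp only [List.foldl_cons]
    by_cases ha : (a == "X") = true
    · simp only [ha, if_true, Bool.xor_true]
      apply ih
      rw [PySem.Int.mod_eq_emod_of_pos (by norm_num : (0:Int) < 2)] at h ⊢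
      cases b with
      | true =>
        simp only [Bool.not_true, Bool.false_eq_true, iff_false, not_not]
        have hc := h.mpr rfl
        omega
      | false =>
        simp only [Bool.not_false, iff_true]
        have hc : c % 2 = 0 := by
          by_contra hc
          exact Bool.false_ne_true (h.mp hc)
        omega
    · simp only [ha, Bool.xor_false]
      exact ih c b h

-- A's fold appends exactly one cell per column
lemma foldl_append_cells : ∀ (cols : List (List String)) (acc : List String),
    cols.foldl
      (fun acc column =>
        let x_counter :=
          column.foldl (fun x item => if item == "X" then x + 1 else x) (0 : Int)
        if PySem.Int.mod x_counter 2 ≠ 0 then acc ++ ["X"]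
        else if PySem.Int.mod x_counter 2 = 0 then acc ++ ["O"] else acc)
      acc
    = acc ++ cols.map (fun column =>
        if PySem.Int.mod
            (column.foldl (fun x item => if item == "X" then x + 1 else x) (0 : Int)) 2 ≠ 0
        then "X" else "O") := by
  intro cols
  induction cols with
  | nil => simp
  | cons col cols ih =>
    intro acc
    simp only [List.foldl_cons, List.map_cons]
    split_ifs with h1 h2
    · rw [ih]; simp
    · rw [ih]; simp
    · omega

lemma getD_replicate_false (n j : Nat) : (List.replicate n false).getD j false = false := by
  by_cases h : j < n
  · rw [List.getD_eq_getElem _ _ (by simpa using h)]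
    simp
  · rw [List.getD_eq_default]
    simpa using h

-- ===== VERDICT (by name: the statement is the Claim_ definition above) =====
theorem add_row_spec : Claim_equal_add_row := by
  intro grid _
  unfold Spec_add_row add_row add_row_alt
  match grid with
  | [] => rfl
  | r :: rs =>
    simp only [List.append_cancel_left_eq, List.cons.injEq, and_true]
    rw [zipStar_eq (r :: rs) (by simp), foldl_append_cells, List.nil_append, List.map_map,
      fold_rows_eq (r :: rs) _ (by intro q hq; simpa using minLen_le hq),
      List.length_replicate, List.map_map]
    apply List.map_congr_left
    intro j _
    have hp := parity_fold (pvCol (r :: rs) j) 0 false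
      (by rw [PySem.Int.mod_eq_emod_of_pos (by norm_num : (0:Int) < 2)]; decide)
    simp only [Function.comp, getD_replicate_false]
    have hfold2 : (pvCol (r :: rs) j).foldl (fun bb item => bb ^^ (item == "X")) false
        = (r :: rs).foldl (fun b q => b ^^ (q.getD j "" == "X")) false := by
      simp [pvCol, List.foldl_map]
    rw [← hfold2]
    by_cases hc : PySem.Int.mod
        ((pvCol (r :: rs) j).foldl (fun x item => if item == "X" then x + 1 else x) (0 : Int)) 2 ≠ 0
    · rw [if_pos hc, if_pos (hp.mp hc)]
    · rw [if_neg hc, if_neg (fun h => hc (hp.mpr h))]
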